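-- pv_equiv track=rewrite | github.com/sacha-ichbiah/tinygrad | tinygrad/fft.py | _factor_list
-- ===== SOURCE A (Python) =====
-- _factor_plan_cache: dict[int, list[int]] = {}
--
-- def _factor_radix(n: int) -> int:
--   for r in (2, 3, 5):
--     if n % r == 0:
--       return r
--   return n
--
-- def _factor_list(n: int) -> list[int]:
--   cached = _factor_plan_cache.get(n)
--   if cached is not None:
--     return cached
--   out = []
--   n0 = n
--   while n > 1:
--     r = _factor_radix(n)
--     out.append(r)
--     n //= r
--   _factor_plan_cache[n0] = out
--   return out
-- ===== SOURCE B (Python) =====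
-- _factor_plan_cache: dict[int, list[int]] = {}
--
-- def _val(m: int, r: int) -> tuple[int, int]:
--   """(e, m // r**e) with e the r-adic valuation of m; O(log e) steps by squaring the radix."""
--   if m % r:
--     return 0, m
--   e, q = _val(m // r, r * r)
--   if q % r:
--     return 2 * e + 1, q
--   return 2 * e + 2, q // r
--
-- def _factor_list(n: int) -> list[int]:
--   cached = _factor_plan_cache.get(n)
--   if cached is not None:
--     return cached
--   out = []
--   if n > 1:
--     m = n
--     for r in (2, 3, 5):
--       e, m = _val(m, r)
--       out += [r] * e
--     if m > 1:
--       out.append(m)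
--   _factor_plan_cache[n] = out
--   return out
-- ===== Notes on version B (the rewrite author's own statement) =====
-- stated objective: alternative
-- what changed: B replaces A's one-factor-at-a-time trial-division loop (smallest dividing radix each round) with a radix-squaring valuation routine: for each r in (2,3,5) it computes the r-adic valuation e of the remaining cofactor recursively via r -> r*r (O(log e) divisions instead of e), emits [r]*e at once, then appends the leftover cofactor.
import Mathlib
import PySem

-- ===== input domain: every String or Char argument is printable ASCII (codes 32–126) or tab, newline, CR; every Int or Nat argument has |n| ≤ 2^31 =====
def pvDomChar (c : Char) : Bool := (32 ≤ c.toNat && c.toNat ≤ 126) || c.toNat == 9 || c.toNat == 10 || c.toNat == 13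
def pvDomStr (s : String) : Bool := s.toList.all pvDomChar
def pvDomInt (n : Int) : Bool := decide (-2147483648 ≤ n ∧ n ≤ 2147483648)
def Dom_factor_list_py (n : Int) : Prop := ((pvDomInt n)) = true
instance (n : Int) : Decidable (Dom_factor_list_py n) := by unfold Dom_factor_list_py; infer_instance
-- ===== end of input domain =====

-- B replaces A's one-factor-at-a-time trial division with a radix-squaring valuation routine
-- (for each r in (2,3,5), the r-adic valuation e is computed recursively via r -> r*r, then
-- [r]*e is emitted at once, then the leftover cofactor); objective: alternative algorithm.
-- A memoizes results in a module-level cache; the cache is pure memoization (value depends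
-- only on n), so both ports are the cache-free computation. Equivalence is about the return value.

-- ===== PORT A =====
def factorRadixA (n : Int) : Int :=
  if PySem.Int.mod n 2 = 0 then 2
  else if PySem.Int.mod n 3 = 0 then 3
  else if PySem.Int.mod n 5 = 0 then 5
  else n

def factor_list_py (n : Int) : List Int :=
  if h : 1 < n then
    let r := factorRadixA n
    r :: factor_list_py (PySem.Int.floordiv n r)
  else []
termination_by n.toNat
decreasing_by
  show (PySem.Int.floordiv n (factorRadixA n)).toNat < n.toNat
  unfold factorRadixA
  split_ifs with h2 h3 h5
  · rw [PySem.Int.mod_eq_emod_of_pos (show (0:Int) < 2 by omega)] at h2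
    rw [PySem.Int.floordiv_eq_ediv_of_pos (show (0:Int) < 2 by omega)]; omega
  · rw [PySem.Int.mod_eq_emod_of_pos (show (0:Int) < 3 by omega)] at h3
    rw [PySem.Int.floordiv_eq_ediv_of_pos (show (0:Int) < 3 by omega)]; omega
  · rw [PySem.Int.mod_eq_emod_of_pos (show (0:Int) < 5 by omega)] at h5
    rw [PySem.Int.floordiv_eq_ediv_of_pos (show (0:Int) < 5 by omega)]; omega
  · rw [PySem.Int.floordiv_eq_ediv_of_pos (show (0:Int) < n by omega), Int.ediv_self (by omega : n ≠ 0)]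
    omega

-- ===== PORT B =====
-- _val(m, r) of Source B: (e, m // r**e), e the r-adic valuation, computed by squaring the radix.
-- The '2 ≤ m ∧ 2 ≤ r' conjuncts are totality guards only: on B's reachable states
-- (m ≥ 1, r ≥ 2) they are implied by m % r == 0.
def valB (m r : Int) : Int × Int :=
  if h : PySem.Int.mod m r = 0 ∧ 2 ≤ m ∧ 2 ≤ r then
    let p := valB (PySem.Int.floordiv m r) (r * r)
    if PySem.Int.mod p.2 r ≠ 0 then (2 * p.1 + 1, p.2)
    else (2 * p.1 + 2, PySem.Int.floordiv p.2 r)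
  else (0, m)
termination_by m.toNat
decreasing_by
  obtain ⟨h1, h2, h3⟩ := h
  rw [PySem.Int.floordiv_eq_ediv_of_pos (show (0:Int) < r by omega)]
  rw [PySem.Int.mod_eq_emod_of_pos (show (0:Int) < r by omega)] at h1
  have hd : r ∣ m := Int.dvd_of_emod_eq_zero h1
  have hq : m / r * r = m := Int.ediv_mul_cancel hd
  have hnn : 0 ≤ m / r := Int.ediv_nonneg (by omega) (by omega)
  have hlt : m / r < m := by nlinarith
  omega

def factor_list_py_alt (n : Int) : List Int :=
  if 1 < n then
    let p2 := valB n 2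
    let p3 := valB p2.2 3
    let p5 := valB p3.2 5
    List.replicate p2.1.toNat 2 ++ List.replicate p3.1.toNat 3 ++ List.replicate p5.1.toNat 5 ++
      (if 1 < p5.2 then [p5.2] else [])
  else []

-- ===== PRECONDITION & SPEC =====
def Spec_factor_list_py (n : Int) (out : List Int) : Prop := out = factor_list_py_alt n
instance (n : Int) (out : List Int) : Decidable (Spec_factor_list_py n out) := by unfold Spec_factor_list_py; infer_instance

-- ===== CLAIM (what is proved, stated in full; the proofs are below) =====
def Claim_equal_factor_list_py : Prop := ∀ (n : Int), Dom_factor_list_py n → Spec_factor_list_py n (factor_list_py n)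

-- ===== LEMMAS AND PROOFS =====

-- proof-only helper: the naive one-at-a-time r-extraction loop, used to bridge A and B
def pullB (r m : Int) : List Int × Int :=
  if h : PySem.Int.mod m r = 0 ∧ 2 ≤ m ∧ 2 ≤ r then
    let p := pullB r (PySem.Int.floordiv m r)
    (r :: p.1, p.2)
  else ([], m)
termination_by m.toNat
decreasing_by
  obtain ⟨h1, h2, h3⟩ := h
  rw [PySem.Int.floordiv_eq_ediv_of_pos (show (0:Int) < r by omega)]
  rw [PySem.Int.mod_eq_emod_of_pos (show (0:Int) < r by omega)] at h1
  have hd : r ∣ m := Int.dvd_of_emod_eq_zero h1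
  have hq : m / r * r = m := Int.ediv_mul_cancel hd
  have hnn : 0 ≤ m / r := Int.ediv_nonneg (by omega) (by omega)
  have hlt : m / r < m := by nlinarith
  omega

-- the then-branch of A rewritten through pullB, as a standalone helper for the induction
def coreB (n : Int) : List Int :=
  (pullB 2 n).1 ++ (pullB 3 (pullB 2 n).2).1 ++ (pullB 5 (pullB 3 (pullB 2 n).2).2).1 ++
    (if 1 < (pullB 5 (pullB 3 (pullB 2 n).2).2).2 then [(pullB 5 (pullB 3 (pullB 2 n).2).2).2] else [])

theorem pullB_pos (r m : Int) (h1 : PySem.Int.mod m r = 0) (h2 : 2 ≤ m) (h3 : 2 ≤ r) :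
    pullB r m = (r :: (pullB r (PySem.Int.floordiv m r)).1, (pullB r (PySem.Int.floordiv m r)).2) := by
  rw [pullB]; simp [h1, h2, h3]

theorem pullB_neg (r m : Int) (h1 : PySem.Int.mod m r ≠ 0) : pullB r m = ([], m) := by
  rw [pullB]; simp [h1]

theorem pullB_small (r m : Int) (h : ¬ 2 ≤ m) : pullB r m = ([], m) := by
  rw [pullB]; simp [h]

theorem coreB_one : coreB 1 = [] := by
  unfold coreB
  rw [pullB_small 2 1 (by omega)]
  simp only
  rw [pullB_small 3 1 (by omega)]
  simp only
  rw [pullB_small 5 1 (by omega)]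
  simp

theorem factor_list_one : factor_list_py 1 = [] := by rw [factor_list_py]; simp

theorem main_eq (n : Int) (hn : 1 ≤ n) : factor_list_py n = coreB n := by
  by_cases h1 : 1 < n
  · have hterm : n.toNat ≠ 0 := by omega
    by_cases h2 : n % 2 = 0
    · have hm2 : PySem.Int.mod n 2 = 0 := by
        rw [PySem.Int.mod_eq_emod_of_pos (show (0:Int) < 2 by omega)]; exact h2
      have hr : factorRadixA n = 2 := by unfold factorRadixA; rw [if_pos hm2]
      have hfd : PySem.Int.floordiv n 2 = n / 2 :=
        PySem.Int.floordiv_eq_ediv_of_pos (show (0:Int) < 2 by omega)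
      have hge : 1 ≤ n / 2 := by omega
      have hlt : (n / 2).toNat < n.toNat := by omega
      have ih := main_eq (n / 2) hge
      rw [factor_list_py]
      simp only [h1, dite_true, hr, hfd]
      rw [ih]
      unfold coreB
      rw [pullB_pos 2 n hm2 (by omega) (by omega), hfd]
      simp [List.cons_append]
    · by_cases h3 : n % 3 = 0
      · have hm2 : PySem.Int.mod n 2 ≠ 0 := by
          rw [PySem.Int.mod_eq_emod_of_pos (show (0:Int) < 2 by omega)]; exact h2
        have hm3 : PySem.Int.mod n 3 = 0 := by
          rw [PySem.Int.mod_eq_emod_of_pos (show (0:Int) < 3 by omega)]; exact h3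
        have hr : factorRadixA n = 3 := by unfold factorRadixA; rw [if_neg hm2, if_pos hm3]
        have hfd : PySem.Int.floordiv n 3 = n / 3 :=
          PySem.Int.floordiv_eq_ediv_of_pos (show (0:Int) < 3 by omega)
        have hge : 1 ≤ n / 3 := by omega
        have hlt : (n / 3).toNat < n.toNat := by omega
        have hq2 : (n / 3) % 2 ≠ 0 := by omega
        have hqm2 : PySem.Int.mod (n / 3) 2 ≠ 0 := by
          rw [PySem.Int.mod_eq_emod_of_pos (show (0:Int) < 2 by omega)]; exact hq2
        have ih := main_eq (n / 3) hge
        rw [factor_list_py]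
        simp only [h1, dite_true, hr, hfd]
        rw [ih]
        unfold coreB
        rw [pullB_neg 2 n hm2, pullB_neg 2 (n / 3) hqm2]
        simp only
        rw [pullB_pos 3 n hm3 (by omega) (by omega), hfd]
        simp [List.cons_append]
      · by_cases h5 : n % 5 = 0
        · have hm2 : PySem.Int.mod n 2 ≠ 0 := by
            rw [PySem.Int.mod_eq_emod_of_pos (show (0:Int) < 2 by omega)]; exact h2
          have hm3 : PySem.Int.mod n 3 ≠ 0 := by
            rw [PySem.Int.mod_eq_emod_of_pos (show (0:Int) < 3 by omega)]; exact h3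
          have hm5 : PySem.Int.mod n 5 = 0 := by
            rw [PySem.Int.mod_eq_emod_of_pos (show (0:Int) < 5 by omega)]; exact h5
          have hr : factorRadixA n = 5 := by unfold factorRadixA; rw [if_neg hm2, if_neg hm3, if_pos hm5]
          have hfd : PySem.Int.floordiv n 5 = n / 5 :=
            PySem.Int.floordiv_eq_ediv_of_pos (show (0:Int) < 5 by omega)
          have hge : 1 ≤ n / 5 := by omega
          have hlt : (n / 5).toNat < n.toNat := by omega
          have hq2 : (n / 5) % 2 ≠ 0 := by omega
          have hq3 : (n / 5) % 3 ≠ 0 := by omega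
          have hqm2 : PySem.Int.mod (n / 5) 2 ≠ 0 := by
            rw [PySem.Int.mod_eq_emod_of_pos (show (0:Int) < 2 by omega)]; exact hq2
          have hqm3 : PySem.Int.mod (n / 5) 3 ≠ 0 := by
            rw [PySem.Int.mod_eq_emod_of_pos (show (0:Int) < 3 by omega)]; exact hq3
          have ih := main_eq (n / 5) hge
          rw [factor_list_py]
          simp only [h1, dite_true, hr, hfd]
          rw [ih]
          unfold coreB
          rw [pullB_neg 2 n hm2, pullB_neg 2 (n / 5) hqm2]
          simp only
          rw [pullB_neg 3 n hm3, pullB_neg 3 (n / 5) hqm3]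
          simp only
          rw [pullB_pos 5 n hm5 (by omega) (by omega), hfd]
          simp [List.cons_append]
        · have hm2 : PySem.Int.mod n 2 ≠ 0 := by
            rw [PySem.Int.mod_eq_emod_of_pos (show (0:Int) < 2 by omega)]; exact h2
          have hm3 : PySem.Int.mod n 3 ≠ 0 := by
            rw [PySem.Int.mod_eq_emod_of_pos (show (0:Int) < 3 by omega)]; exact h3
          have hm5 : PySem.Int.mod n 5 ≠ 0 := by
            rw [PySem.Int.mod_eq_emod_of_pos (show (0:Int) < 5 by omega)]; exact h5
          have hr : factorRadixA n = n := by unfold factorRadixA; rw [if_neg hm2, if_neg hm3, if_neg hm5]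
          have hfd : PySem.Int.floordiv n n = 1 := by
            rw [PySem.Int.floordiv_eq_ediv_of_pos (show (0:Int) < n by omega),
              Int.ediv_self (by omega : n ≠ 0)]
          rw [factor_list_py]
          simp only [h1, dite_true, hr, hfd, factor_list_one]
          unfold coreB
          rw [pullB_neg 2 n hm2]
          simp only
          rw [pullB_neg 3 n hm3]
          simp only
          rw [pullB_neg 5 n hm5]
          simp [h1]
  · have : n = 1 := by omega
    subst this
    rw [factor_list_one, coreB_one]
termination_by n.toNat

-- characterization of pullB: e repetitions of r, cofactor not divisible by r
theorem pullB_spec_aux (r : Int) (hr : 2 ≤ r) : ∀ k : ℕ, ∀ m : Int, m.toNat ≤ k → 1 ≤ m →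
    ∃ e : ℕ, (pullB r m).1 = List.replicate e r ∧ m = r ^ e * (pullB r m).2 ∧
      ¬ r ∣ (pullB r m).2 ∧ 1 ≤ (pullB r m).2 := by
  intro k
  induction k with
  | zero => intro m hk hm; omega
  | succ k ih =>
    intro m hk hm
    by_cases hg : PySem.Int.mod m r = 0 ∧ 2 ≤ m
    · obtain ⟨h1, h2⟩ := hg
      have hmod : m % r = 0 := by
        rw [PySem.Int.mod_eq_emod_of_pos (show (0:Int) < r by omega)] at h1; exact h1
      have hd : r ∣ m := Int.dvd_of_emod_eq_zero hmod
      have hmul : m / r * r = m := Int.ediv_mul_cancel hd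
      have hfd : PySem.Int.floordiv m r = m / r :=
        PySem.Int.floordiv_eq_ediv_of_pos (show (0:Int) < r by omega)
      have hge : 1 ≤ m / r := by nlinarith [Int.ediv_nonneg (show (0:Int) ≤ m by omega) (show (0:Int) ≤ r by omega)]
      have hlt : m / r < m := by nlinarith
      obtain ⟨e, hl, hprod, hnd, hpos⟩ := ih (m / r) (by omega) hge
      refine ⟨e + 1, ?_, ?_, ?_, ?_⟩
      · rw [pullB_pos r m h1 h2 hr, hfd]; simp [hl, List.replicate_succ]
      · rw [pullB_pos r m h1 h2 hr, hfd]
        simp only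
        calc m = m / r * r := hmul.symm
        _ = (r ^ e * (pullB r (m / r)).2) * r := by rw [← hprod]
        _ = r ^ (e + 1) * (pullB r (m / r)).2 := by ring
      · rw [pullB_pos r m h1 h2 hr, hfd]; exact hnd
      · rw [pullB_pos r m h1 h2 hr, hfd]; exact hpos
    · have hres : pullB r m = ([], m) := by
        rw [pullB]
        have : ¬ (PySem.Int.mod m r = 0 ∧ 2 ≤ m ∧ 2 ≤ r) := by tauto
        simp [this]
      refine ⟨0, by simp [hres], by simp [hres], ?_, by rw [hres]; exact hm⟩
      rw [hres]
      simp only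
      by_cases h2 : 2 ≤ m
      · have h1 : PySem.Int.mod m r ≠ 0 := fun h => hg ⟨h, h2⟩
        rw [PySem.Int.mod_eq_emod_of_pos (show (0:Int) < r by omega)] at h1
        exact fun hdvd => h1 (Int.emod_eq_zero_of_dvd hdvd)
      · have : m = 1 := by omega
        subst this
        intro hdvd
        have := Int.le_of_dvd (by omega) hdvd
        omega

theorem pullB_spec (r : Int) (hr : 2 ≤ r) (m : Int) (hm : 1 ≤ m) :
    ∃ e : ℕ, (pullB r m).1 = List.replicate e r ∧ m = r ^ e * (pullB r m).2 ∧
      ¬ r ∣ (pullB r m).2 ∧ 1 ≤ (pullB r m).2 :=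
  pullB_spec_aux r hr m.toNat m (le_refl _) hm

-- characterization of valB: same e and cofactor
theorem valB_spec_aux : ∀ k : ℕ, ∀ m r : Int, m.toNat ≤ k → 1 ≤ m → 2 ≤ r →
    ∃ e : ℕ, (valB m r).1 = (e : Int) ∧ m = r ^ e * (valB m r).2 ∧
      ¬ r ∣ (valB m r).2 ∧ 1 ≤ (valB m r).2 := by
  intro k
  induction k with
  | zero => intro m r hk hm hr; omega
  | succ k ih =>
    intro m r hk hm hr
    by_cases hg : PySem.Int.mod m r = 0 ∧ 2 ≤ m
    · obtain ⟨h1, h2⟩ := hg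
      have hmod : m % r = 0 := by
        rw [PySem.Int.mod_eq_emod_of_pos (show (0:Int) < r by omega)] at h1; exact h1
      have hd : r ∣ m := Int.dvd_of_emod_eq_zero hmod
      have hmul : m / r * r = m := Int.ediv_mul_cancel hd
      have hfd : PySem.Int.floordiv m r = m / r :=
        PySem.Int.floordiv_eq_ediv_of_pos (show (0:Int) < r by omega)
      have hge : 1 ≤ m / r := by nlinarith [Int.ediv_nonneg (show (0:Int) ≤ m by omega) (show (0:Int) ≤ r by omega)]
      have hlt : m / r < m := by nlinarith
      obtain ⟨e, hv, hprod, hnd, hpos⟩ := ih (m / r) (r * r) (by omega) hge (by nlinarith)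
      have hunf : valB m r =
          if PySem.Int.mod (valB (m / r) (r * r)).2 r ≠ 0 then
            (2 * (valB (m / r) (r * r)).1 + 1, (valB (m / r) (r * r)).2)
          else (2 * (valB (m / r) (r * r)).1 + 2, PySem.Int.floordiv (valB (m / r) (r * r)).2 r) := by
        rw [valB]
        simp [h1, h2, hr, hfd]
      set q := (valB (m / r) (r * r)).2 with hq
      have hmq : m = r ^ (2 * e + 1) * q := by
        calc m = m / r * r := hmul.symm
        _ = ((r * r) ^ e * q) * r := by rw [← hprod]
        _ = r ^ (2 * e + 1) * q := by rw [← pow_two, ← pow_mul]; ring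
      by_cases hqr : r ∣ q
      · -- second branch: one more factor of r
        have hqmod : PySem.Int.mod q r = 0 := by
          rw [PySem.Int.mod_eq_emod_of_pos (show (0:Int) < r by omega)]
          exact Int.emod_eq_zero_of_dvd hqr
        have hres : valB m r = (2 * (e : Int) + 2, PySem.Int.floordiv q r) := by
          rw [hunf]; simp [hqmod, hv]
        have hfd2 : PySem.Int.floordiv q r = q / r :=
          PySem.Int.floordiv_eq_ediv_of_pos (show (0:Int) < r by omega)
        have hmul2 : q / r * r = q := Int.ediv_mul_cancel hqr
        have hge2 : 1 ≤ q / r := by nlinarith [Int.ediv_nonneg (show (0:Int) ≤ q by omega) (show (0:Int) ≤ r by omega)]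
        refine ⟨2 * e + 2, ?_, ?_, ?_, ?_⟩
        · rw [hres]; push_cast; ring
        · rw [hres, hfd2]
          simp only
          calc m = r ^ (2 * e + 1) * q := hmq
          _ = r ^ (2 * e + 1) * (q / r * r) := by rw [hmul2]
          _ = r ^ (2 * e + 2) * (q / r) := by ring
        · rw [hres, hfd2]
          simp only
          intro hdvd
          apply hnd
          obtain ⟨t, ht⟩ := hdvd
          exact ⟨t, by rw [← hmul2, ht]; ring⟩
        · rw [hres, hfd2]; exact hge2
      · -- first branch: q not divisible by r
        have hqmod : PySem.Int.mod q r ≠ 0 := by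
          rw [PySem.Int.mod_eq_emod_of_pos (show (0:Int) < r by omega)]
          exact fun h => hqr (Int.dvd_of_emod_eq_zero h)
        have hres : valB m r = (2 * (e : Int) + 1, q) := by
          rw [hunf]; simp [hqmod, hv]
        refine ⟨2 * e + 1, ?_, ?_, ?_, ?_⟩
        · rw [hres]; push_cast; ring
        · rw [hres]; exact hmq
        · rw [hres]; exact hqr
        · rw [hres]; exact hpos
    · have hres : valB m r = (0, m) := by
        rw [valB]
        have : ¬ (PySem.Int.mod m r = 0 ∧ 2 ≤ m ∧ 2 ≤ r) := by tauto
        simp [this]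
      refine ⟨0, by simp [hres], by simp [hres], ?_, by rw [hres]; exact hm⟩
      rw [hres]
      simp only
      by_cases h2 : 2 ≤ m
      · have h1 : PySem.Int.mod m r ≠ 0 := fun h => hg ⟨h, h2⟩
        rw [PySem.Int.mod_eq_emod_of_pos (show (0:Int) < r by omega)] at h1
        exact fun hdvd => h1 (Int.emod_eq_zero_of_dvd hdvd)
      · have : m = 1 := by omega
        subst this
        intro hdvd
        have := Int.le_of_dvd (by omega) hdvd
        omega

theorem valB_spec (m r : Int) (hm : 1 ≤ m) (hr : 2 ≤ r) :
    ∃ e : ℕ, (valB m r).1 = (e : Int) ∧ m = r ^ e * (valB m r).2 ∧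
      ¬ r ∣ (valB m r).2 ∧ 1 ≤ (valB m r).2 :=
  valB_spec_aux m.toNat m r (le_refl _) hm hr

-- uniqueness of (e, q) with m = r^e q, r ∤ q
theorem val_unique (r : Int) (hr : 2 ≤ r) (e1 e2 : ℕ) (q1 q2 : Int)
    (hq1 : ¬ r ∣ q1) (hq2 : ¬ r ∣ q2) (heq : r ^ e1 * q1 = r ^ e2 * q2) :
    e1 = e2 ∧ q1 = q2 := by
  induction e1 generalizing e2 with
  | zero =>
    cases e2 with
    | zero => simpa using heq
    | succ e =>
      exfalso
      apply hq1
      simp only [pow_zero, one_mul] at heq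
      exact ⟨r ^ e * q2, by rw [heq, pow_succ]; ring⟩
  | succ e1' ih =>
    cases e2 with
    | zero =>
      exfalso
      apply hq2
      simp only [pow_zero, one_mul] at heq
      exact ⟨r ^ e1' * q1, by rw [← heq, pow_succ]; ring⟩
    | succ e2' =>
      have hr0 : r ≠ 0 := by omega
      have heq' : r ^ e1' * q1 = r ^ e2' * q2 := by
        apply mul_left_cancel₀ hr0
        calc r * (r ^ e1' * q1) = r ^ (e1' + 1) * q1 := by rw [pow_succ]; ring
        _ = r ^ (e2' + 1) * q2 := heq
        _ = r * (r ^ e2' * q2) := by rw [pow_succ]; ring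
      obtain ⟨he, hq⟩ := ih e2' heq'
      exact ⟨by omega, hq⟩

theorem pullB_eq_valB (r m : Int) (hr : 2 ≤ r) (hm : 1 ≤ m) :
    (pullB r m).1 = List.replicate (valB m r).1.toNat r ∧ (pullB r m).2 = (valB m r).2 := by
  obtain ⟨e1, hl, hprod1, hnd1, hpos1⟩ := pullB_spec r hr m hm
  obtain ⟨e2, hv, hprod2, hnd2, hpos2⟩ := valB_spec m r hm hr
  obtain ⟨hee, hqq⟩ := val_unique r hr e1 e2 _ _ hnd1 hnd2 (hprod1 ▸ hprod2)
  refine ⟨?_, hqq⟩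
  rw [hl, hv, hee]
  simp

theorem coreB_eq_alt (n : Int) (h1 : 1 < n) : coreB n = factor_list_py_alt n := by
  have p2 := pullB_eq_valB 2 n (by omega) (by omega)
  have hpos2 : 1 ≤ (pullB 2 n).2 := by
    obtain ⟨e, _, _, _, h⟩ := pullB_spec 2 (by omega) n (by omega); exact h
  have p3 := pullB_eq_valB 3 (pullB 2 n).2 (by omega) hpos2
  have hpos3 : 1 ≤ (pullB 3 (pullB 2 n).2).2 := by
    obtain ⟨e, _, _, _, h⟩ := pullB_spec 3 (by omega) (pullB 2 n).2 hpos2; exact h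
  have p5 := pullB_eq_valB 5 (pullB 3 (pullB 2 n).2).2 (by omega) hpos3
  unfold coreB factor_list_py_alt
  rw [if_pos h1]
  rw [p2.2] at p3
  rw [p2.2, p3.2] at p5
  rw [p2.1, p2.2, p3.1, p3.2, p5.1, p5.2]

-- ===== VERDICT (by name: the statement is the Claim_ definition above) =====
theorem factor_list_py_spec : Claim_equal_factor_list_py := by
  intro n _
  unfold Spec_factor_list_py
  by_cases h : 1 < n
  · rw [main_eq n (by omega), coreB_eq_alt n h]
  · rw [factor_list_py]
    unfold factor_list_py_alt
    simp [h]
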